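-- pv_equiv track=rewrite | github.com/pypi-data/pypi-mirror-356 | packages/taskdaily/taskdaily-0.1.0.tar.gz/taskdaily-0.1.0/taskdaily/utils/text.py | split_into_sections
-- ===== SOURCE A (Python) =====
-- from typing import List, Dict, Any
--
-- def split_into_sections(content: str, markers: List[str]) -> List[str]:
--     """Split content into sections based on headers."""
--     sections = []
--     current_section = []
--
--     for line in content.split('\n'):
--         if line.strip() and any(line.startswith(m) for m in markers):
--             if current_section:
--                 sections.append('\n'.join(current_section))
--             current_section = [line]
--         else:
--             current_section.append(line)
--
--     if current_section:
--         sections.append('\n'.join(current_section))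
--
--     return sections
-- ===== SOURCE B (Python) =====
-- def split_into_sections(content, markers):
--     """Split content into sections based on headers (index-free chunk recursion)."""
--     def is_body(line):
--         return not (line.strip() and line.startswith(tuple(markers)))
--
--     def chunks(lines):
--         if not lines:
--             return []
--         rest = lines[1:]
--         body = []
--         for line in rest:
--             if is_body(line):
--                 body.append(line)
--             else:
--                 break
--         return ['\n'.join(lines[:1 + len(body)])] + chunks(rest[len(body):])
--
--     return chunks(content.split('\n'))
-- ===== Notes on version B (the rewrite author's own statement) =====
-- stated objective: alternative
-- what changed: Replaces A's running-accumulator-with-flush fold by a chunk recursion that takes the header line, scans forward for the section body (for/break), emits the joined slice and recurses on the remainder.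
import Mathlib
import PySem

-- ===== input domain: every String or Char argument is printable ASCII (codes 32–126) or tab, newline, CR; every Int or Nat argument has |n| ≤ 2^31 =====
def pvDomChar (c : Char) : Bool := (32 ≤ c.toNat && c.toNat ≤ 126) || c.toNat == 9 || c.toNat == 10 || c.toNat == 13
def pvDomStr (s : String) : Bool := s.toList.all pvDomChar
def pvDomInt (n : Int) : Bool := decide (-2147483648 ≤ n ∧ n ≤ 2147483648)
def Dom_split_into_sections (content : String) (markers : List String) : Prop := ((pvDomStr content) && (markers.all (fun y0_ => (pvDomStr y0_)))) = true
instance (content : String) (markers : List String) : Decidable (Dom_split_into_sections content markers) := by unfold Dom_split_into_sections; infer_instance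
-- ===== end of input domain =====

-- B replaces A's accumulator-with-flush loop by a chunk recursion (head line + body scan, then recurse on the rest); same cost, different decomposition.

-- ===== PORT A =====
-- one loop step of A: flush current section on a non-blank marker line, else accumulate
def pvStepA (markers : List String) (st : List String × List String) (line : String) :
    List String × List String :=
  if (PySem.Str.strip line != "") && markers.any (fun m => PySem.Str.startswith line m) then
    (if st.2 ≠ [] then st.1 ++ [PySem.Str.join "\n" st.2] else st.1, [line])
  else
    (st.1, st.2 ++ [line])

-- content.split('\n'): split? is some for the nonempty separator "\n"
def split_into_sections (content : String) (markers : List String) : List String :=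
  let r := ((PySem.Str.split? content "\n").getD []).foldl (pvStepA markers) ([], [])
  if r.2 ≠ [] then r.1 ++ [PySem.Str.join "\n" r.2] else r.1

-- ===== PORT B =====
-- Source B's is_body predicate
def pvIsBody (markers : List String) (line : String) : Bool :=
  !((PySem.Str.strip line != "") && markers.any (fun m => PySem.Str.startswith line m))

-- Source B's for/break loop collecting the body lines after the chunk head
def pvTakeBody (markers : List String) : List String → List String
  | [] => []
  | l :: t => if pvIsBody markers l then l :: pvTakeBody markers t else []

-- Source B's chunks: lines[:1+len(body)] / rest[len(body):] are take / drop (nonnegative Python slices)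
def pvChunks (markers : List String) : List String → List String
  | [] => []
  | l :: rest =>
    let body := pvTakeBody markers rest
    PySem.Str.join "\n" ((l :: rest).take (1 + body.length)) ::
      pvChunks markers (rest.drop body.length)
termination_by lines => lines.length
decreasing_by simp

def split_into_sections_alt (content : String) (markers : List String) : List String :=
  pvChunks markers ((PySem.Str.split? content "\n").getD [])

-- ===== PRECONDITION & SPEC =====
def Spec_split_into_sections (content : String) (markers : List String) (out : List String) : Prop := out = split_into_sections_alt content markers
instance (content : String) (markers : List String) (out : List String) : Decidable (Spec_split_into_sections content markers out) := by unfold Spec_split_into_sections; infer_instance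

-- ===== CLAIM (what is proved, stated in full; the proofs are below) =====
def Claim_equal_split_into_sections : Prop := ∀ (content : String) (markers : List String), Dom_split_into_sections content markers → Spec_split_into_sections content markers (split_into_sections content markers)

-- ===== LEMMAS AND PROOFS =====

theorem pvChunks_nil (markers : List String) : pvChunks markers [] = [] := by
  rw [pvChunks.eq_1]

theorem pvTakeBody_eq_takeWhile (markers : List String) (t : List String) :
    pvTakeBody markers t = t.takeWhile (pvIsBody markers) := by
  induction t with
  | nil => rfl
  | cons l t ih => cases h : pvIsBody markers l <;> simp [pvTakeBody, List.takeWhile, h, ih]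

theorem take_length_takeWhile {α : Type} (p : α → Bool) (t : List α) :
    t.take (t.takeWhile p).length = t.takeWhile p := by
  induction t with
  | nil => rfl
  | cons l t ih => cases h : p l <;> simp [List.takeWhile, h, ih]

theorem drop_length_takeWhile {α : Type} (p : α → Bool) (t : List α) :
    t.drop (t.takeWhile p).length = t.dropWhile p := by
  induction t with
  | nil => rfl
  | cons l t ih => cases h : p l <;> simp [List.takeWhile, List.dropWhile, h, ih]

-- pvChunks on a nonempty list, rewritten with takeWhile / dropWhile
theorem pvChunks_cons (markers : List String) (l : String) (t : List String) :
    pvChunks markers (l :: t) =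
      PySem.Str.join "\n" (l :: t.takeWhile (pvIsBody markers)) ::
        pvChunks markers (t.dropWhile (pvIsBody markers)) := by
  rw [pvChunks.eq_2]
  simp only [pvTakeBody_eq_takeWhile]
  rw [Nat.add_comm 1, List.take_succ_cons, take_length_takeWhile, drop_length_takeWhile]

-- main invariant: A's fold from (sections, cur) with cur ≠ [] produces B's chunks
theorem pvLoopA (markers : List String) (t : List String) :
    ∀ (sections cur : List String), cur ≠ [] →
      (let r := t.foldl (pvStepA markers) (sections, cur)
       if r.2 ≠ [] then r.1 ++ [PySem.Str.join "\n" r.2] else r.1) =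
      sections ++ (PySem.Str.join "\n" (cur ++ t.takeWhile (pvIsBody markers)) ::
        pvChunks markers (t.dropWhile (pvIsBody markers))) := by
  induction t with
  | nil => intro sections cur hc; simp [hc, pvChunks_nil]
  | cons l t ih =>
    intro sections cur hc
    cases hb : pvIsBody markers l with
    | true =>
      have hdr : ((PySem.Str.strip l != "") && markers.any (fun m => PySem.Str.startswith l m)) = false := by
        have h2 := hb; unfold pvIsBody at h2
        cases h : (PySem.Str.strip l != "" && markers.any fun m => PySem.Str.startswith l m)
        · rfl
        · rw [h] at h2; simp at h2
      have hstep : pvStepA markers (sections, cur) l = (sections, cur ++ [l]) := by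
        unfold pvStepA; rw [hdr]; simp
      simp only [List.foldl_cons, hstep]
      rw [ih sections (cur ++ [l]) (by simp)]
      simp [List.takeWhile, List.dropWhile, hb]
    | false =>
      have hdr : ((PySem.Str.strip l != "") && markers.any (fun m => PySem.Str.startswith l m)) = true := by
        have h2 := hb; unfold pvIsBody at h2
        cases h : (PySem.Str.strip l != "" && markers.any fun m => PySem.Str.startswith l m)
        · rw [h] at h2; simp at h2
        · rfl
      have hstep : pvStepA markers (sections, cur) l = (sections ++ [PySem.Str.join "\n" cur], [l]) := by
        unfold pvStepA; rw [hdr]; simp [hc]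
      simp only [List.foldl_cons, hstep]
      rw [ih (sections ++ [PySem.Str.join "\n" cur]) [l] (by simp)]
      simp [List.takeWhile, List.dropWhile, hb, pvChunks_cons]

-- ===== VERDICT (by name: the statement is the Claim_ definition above) =====
theorem split_into_sections_spec : Claim_equal_split_into_sections := by
  intro content markers _
  unfold Spec_split_into_sections split_into_sections split_into_sections_alt
  cases h : (PySem.Str.split? content "\n").getD [] with
  | nil => simp [pvChunks_nil]
  | cons l t =>
    have hfirst : pvStepA markers ([], []) l = ([], [l]) := by
      unfold pvStepA; split <;> rfl
    simp only [List.foldl_cons, hfirst]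
    rw [pvLoopA markers t [] [l] (by simp), pvChunks_cons]
    simp
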